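-- pv_equiv track=rewrite | github.com/Eli-PinhasG/Zotero-Obsidian-Integration | Z_O_Integration_User.py | _gap_split
-- ===== SOURCE A (Python) =====
-- def _page_label_to_int(page_label: str):
--     """Convert a plain-integer page label to int; return None for roman/alpha labels."""
--     if not page_label:
--         return None
--     try:
--         return int(page_label.strip())
--     except ValueError:
--         return None
--
-- def _gap_split(annotations: list, gap_threshold: int) -> list:
--     """Split a sorted annotation list into sublists wherever page gap > gap_threshold.
--     Returns a list of lists (each sublist is a group of annotations).
--     """
--     if not annotations:
--         return []
--     groups = []
--     current = [annotations[0]]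
--     prev_page = _page_label_to_int(annotations[0].get('page_label', ''))
--     for ann in annotations[1:]:
--         page = _page_label_to_int(ann.get('page_label', ''))
--         if prev_page is not None and page is not None and page - prev_page > gap_threshold:
--             groups.append(current)
--             current = []
--         current.append(ann)
--         if page is not None:
--             prev_page = page
--     groups.append(current)
--     return [g for g in groups if g]
-- ===== SOURCE B (Python) =====
-- def _page_label_to_int(page_label: str):
--     """Convert a plain-integer page label to int; return None for roman/alpha labels."""
--     if not page_label:
--         return None
--     try:
--         return int(page_label.strip())
--     except ValueError:
--         return None
--
-- def _gap_split(annotations: list, gap_threshold: int) -> list: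
--     """Boundary-table version: collect split positions first, then slice."""
--     if not annotations:
--         return []
--     pages = [_page_label_to_int(a.get('page_label', '')) for a in annotations]
--     bounds = []
--     last = None
--     for i, p in enumerate(pages):
--         if i > 0 and last is not None and p is not None and p - last > gap_threshold:
--             bounds.append(i)
--         if p is not None:
--             last = p
--     n = len(annotations)
--     return [annotations[a:b] for a, b in zip([0] + bounds, bounds + [n])]
-- ===== Notes on version B (the rewrite author's own statement) =====
-- stated objective: alternative
-- what changed: B replaces A's incremental append-and-flush group accumulation with a two-pass table-then-slice decomposition: one pass over the parsed page labels records the absolute indices where a gap-split occurs, then the groups are produced by slicing the input list between adjacent boundary indices.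
import Mathlib
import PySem

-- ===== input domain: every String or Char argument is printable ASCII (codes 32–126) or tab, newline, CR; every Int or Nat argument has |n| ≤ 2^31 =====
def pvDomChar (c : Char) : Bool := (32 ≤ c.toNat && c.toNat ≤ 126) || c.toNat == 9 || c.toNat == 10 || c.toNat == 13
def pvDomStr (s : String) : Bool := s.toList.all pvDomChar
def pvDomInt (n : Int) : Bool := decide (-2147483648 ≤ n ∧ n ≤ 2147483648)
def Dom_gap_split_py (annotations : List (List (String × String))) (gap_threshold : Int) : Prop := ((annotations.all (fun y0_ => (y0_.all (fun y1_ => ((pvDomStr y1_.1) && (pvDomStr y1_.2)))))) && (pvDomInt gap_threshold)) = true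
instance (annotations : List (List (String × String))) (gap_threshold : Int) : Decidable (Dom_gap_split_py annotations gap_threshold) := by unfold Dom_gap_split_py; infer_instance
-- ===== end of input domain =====

-- B replaces A's append-and-flush accumulation with a boundary table built in one pass
-- and a final slicing comprehension (alternative decomposition; same O(n) cost).

-- ===== PORT A =====
-- helper `_page_label_to_int` (shared by both Pythons verbatim)
def pageLabelToInt (page_label : String) : Option Int :=
  if page_label = "" then none
  else PySem.Int.ofStr? (PySem.Str.strip page_label)

-- dict.get(k, default) on an association list = value of the FIRST pair with that key
-- (exact: insertion-order assoc list, first-match lookup)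
def pvGetD (d : List (String × String)) (k dflt : String) : String :=
  match d.find? (fun kv => kv.1 == k) with
  | some kv => kv.2
  | none => dflt

-- the gap condition `prev is not None and page is not None and page - prev > gap`
def pvGap (gap : Int) (prev page : Option Int) : Bool :=
  match prev, page with
  | some q, some r => decide (r - q > gap)
  | _, _ => false

def gap_split_py (annotations : List (List (String × String))) (gap_threshold : Int) : List (List (List (String × String))) :=
  match annotations with
  | [] => []
  | a0 :: rest =>
    let st := rest.foldl
      (fun (st : List (List (List (String × String))) × List (List (String × String)) × Option Int) ann =>
        let page := pageLabelToInt (pvGetD ann "page_label" "")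
        let st2 := if pvGap gap_threshold st.2.2 page then (st.1 ++ [st.2.1], ([] : List (List (String × String)))) else (st.1, st.2.1)
        let current := st2.2 ++ [ann]
        let prev := if page.isSome then page else st.2.2
        (st2.1, current, prev))
      ([], [a0], pageLabelToInt (pvGetD a0 "page_label" ""))
    (st.1 ++ [st.2.1]).filter (fun g => !g.isEmpty)

-- ===== PORT B =====
def gap_split_py_alt (annotations : List (List (String × String))) (gap_threshold : Int) : List (List (List (String × String))) :=
  if annotations = [] then []
  else
    let pages := annotations.map (fun a => pageLabelToInt (pvGetD a "page_label" ""))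
    let bl := (PySem.List.enumerate pages).foldl
      (fun (st : List Int × Option Int) ip =>
        let bounds := if ip.1 > 0 && pvGap gap_threshold st.2 ip.2 then st.1 ++ [ip.1] else st.1
        let last := if ip.2.isSome then ip.2 else st.2
        (bounds, last)) ([], none)
    let n : Int := annotations.length
    ((0 :: bl.1).zip (bl.1 ++ [n])).map (fun ab => PySem.List.slice annotations (some ab.1) (some ab.2))

-- ===== PRECONDITION & SPEC =====
def Spec_gap_split_py (annotations : List (List (String × String))) (gap_threshold : Int) (out : List (List (List (String × String)))) : Prop := out = gap_split_py_alt annotations gap_threshold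
instance (annotations : List (List (String × String))) (gap_threshold : Int) (out : List (List (List (String × String)))) : Decidable (Spec_gap_split_py annotations gap_threshold out) := by unfold Spec_gap_split_py; infer_instance

-- ===== CLAIM (what is proved, stated in full; the proofs are below) =====
def Claim_equal_gap_split_py : Prop := ∀ (annotations : List (List (String × String))) (gap_threshold : Int), Dom_gap_split_py annotations gap_threshold → Spec_gap_split_py annotations gap_threshold (gap_split_py annotations gap_threshold)

-- ===== LEMMAS AND PROOFS =====

-- reference recursion both ports are reduced to
def pvGo (gap : Int) (f : List (String × String) → Option Int) :
    Option Int → List (List (String × String)) → List (List (String × String)) → List (List (List (String × String)))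
  | _, curr, [] => [curr]
  | prev, curr, a :: l =>
    let p := f a
    let prev' := if p.isSome then p else prev
    if pvGap gap prev p then curr :: pvGo gap f prev' [a] l
    else pvGo gap f prev' (curr ++ [a]) l

-- boundary positions of pvGo, as absolute indices
def pvBounds (gap : Int) : Option Int → Int → List (Option Int) → List Int
  | _, _, [] => []
  | prev, s, p :: l =>
    let prev' := if p.isSome then p else prev
    if pvGap gap prev p then s :: pvBounds gap prev' (s + 1) l
    else pvBounds gap prev' (s + 1) l

def pvSlices (xs : List (List (String × String))) (a : Int) (bs : List Int) (n : Int) : List (List (List (String × String))) :=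
  ((a :: bs).zip (bs ++ [n])).map (fun ab => PySem.List.slice xs (some ab.1) (some ab.2))

theorem pvSlices_nil (xs : List (List (String × String))) (a n : Int) :
    pvSlices xs a [] n = [PySem.List.slice xs (some a) (some n)] := rfl

theorem pvSlices_cons (xs : List (List (String × String))) (a b : Int) (bs : List Int) (n : Int) :
    pvSlices xs a (b :: bs) n = PySem.List.slice xs (some a) (some b) :: pvSlices xs b bs n := rfl

-- A's fold equals pvGo
theorem lemA (gap : Int) (l : List (List (String × String)))
    : ∀ (groups : List (List (List (String × String)))) (curr : List (List (String × String))) (prev : Option Int),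
      (∀ g ∈ groups, g ≠ []) → curr ≠ [] →
      (let st := l.foldl
        (fun (st : List (List (List (String × String))) × List (List (String × String)) × Option Int) ann =>
          let page := pageLabelToInt (pvGetD ann "page_label" "")
          let st2 := if pvGap gap st.2.2 page then (st.1 ++ [st.2.1], ([] : List (List (String × String)))) else (st.1, st.2.1)
          let current := st2.2 ++ [ann]
          let prev := if page.isSome then page else st.2.2
          (st2.1, current, prev)) (groups, curr, prev)
       (st.1 ++ [st.2.1]).filter (fun g => !g.isEmpty))
      = groups ++ pvGo gap (fun a => pageLabelToInt (pvGetD a "page_label" "")) prev curr l := by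
  induction l with
  | nil =>
    intro groups curr prev hg hc
    simp only [List.foldl_nil, pvGo]
    rw [List.filter_eq_self.2]
    intro g hmem
    rcases List.mem_append.1 hmem with h | h
    · simpa using hg g h
    · simp at h; subst h; simpa using hc
  | cons a l ih =>
    intro groups curr prev hg hc
    simp only [List.foldl_cons, pvGo]
    by_cases h : pvGap gap prev (pageLabelToInt (pvGetD a "page_label" "")) = true
    · simp only [h, if_pos]
      have hg' : ∀ g ∈ groups ++ [curr], g ≠ [] := by
        intro g hmem
        rcases List.mem_append.1 hmem with h1 | h1
        · exact hg g h1
        · simp at h1; subst h1; exact hc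
      rw [ih (groups ++ [curr]) ([] ++ [a])
        (if (pageLabelToInt (pvGetD a "page_label" "")).isSome then
          pageLabelToInt (pvGetD a "page_label" "") else prev) hg' (by simp)]
      simp
    · simp only [h, if_false, Bool.false_eq_true]
      rw [ih groups (curr ++ [a])
        (if (pageLabelToInt (pvGetD a "page_label" "")).isSome then
          pageLabelToInt (pvGetD a "page_label" "") else prev) hg (by simp)]

-- B's boundary fold equals pvBounds (indices all positive, so the i>0 guard passes)
theorem lemB1 (gap : Int) (l : List (Option Int))
    : ∀ (s : Int) (bs : List Int) (last : Option Int), 0 < s →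
      ((PySem.List.enumerate l s).foldl
        (fun (st : List Int × Option Int) ip =>
          let bounds := if ip.1 > 0 && pvGap gap st.2 ip.2 then st.1 ++ [ip.1] else st.1
          let last := if ip.2.isSome then ip.2 else st.2
          (bounds, last)) (bs, last)).1
      = bs ++ pvBounds gap last s l := by
  induction l with
  | nil => intro s bs last _; simp [PySem.List.enumerate, pvBounds]
  | cons p l ih =>
    intro s bs last hs
    rw [PySem.List.enumerate_cons]
    simp only [List.foldl_cons, pvBounds]
    have hgt : decide (s > 0) = true := by simpa using hs
    by_cases h : pvGap gap last p = true
    · simp only [hgt, h, Bool.and_self, if_pos]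
      rw [ih (s + 1) (bs ++ [s]) (if p.isSome then p else last) (by omega)]
      simp
    · simp only [hgt, h, Bool.and_false, if_false, Bool.false_eq_true]
      rw [ih (s + 1) bs (if p.isSome then p else last) (by omega)]

-- slicing at the boundary table reproduces pvGo
theorem lemB2 (gap : Int) (f : List (String × String) → Option Int) (l : List (List (String × String)))
    : ∀ (prev : Option Int) (curr pre : List (List (String × String))),
      pvSlices (pre ++ curr ++ l) (pre.length : Int)
        (pvBounds gap prev ((pre ++ curr).length : Int) (l.map f))
        ((pre ++ curr ++ l).length : Int)
      = pvGo gap f prev curr l := by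
  induction l with
  | nil =>
    intro prev curr pre
    simp only [List.map_nil, pvBounds, pvGo, List.append_nil]
    rw [pvSlices_nil, PySem.List.slice_natCast]
    congr 1
    rw [List.drop_left, List.length_append, Nat.add_sub_cancel_left, List.take_length]
  | cons a l ih =>
    intro prev curr pre
    simp only [List.map_cons, pvBounds, pvGo]
    by_cases h : pvGap gap prev (f a) = true
    · simp only [h, if_pos]
      have tail := ih (if (f a).isSome then f a else prev) [a] (pre ++ curr)
      have hl1 : (pre ++ curr) ++ [a] ++ l = pre ++ curr ++ a :: l := by simp
      have hl2 : (((pre ++ curr) ++ [a]).length : Int) = ((pre ++ curr).length : Int) + 1 := by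
        push_cast [List.length_append, List.length_singleton]
        ring
      rw [hl1, hl2] at tail
      have head : PySem.List.slice (pre ++ curr ++ a :: l) (some (pre.length : Int))
          (some ((pre ++ curr).length : Int)) = curr := by
        rw [PySem.List.slice_natCast]
        rw [show pre ++ curr ++ a :: l = pre ++ (curr ++ a :: l) by simp, List.drop_left]
        rw [List.length_append, Nat.add_sub_cancel_left]
        exact List.take_left' rfl
      rw [pvSlices_cons, head, tail]
    · simp only [h, if_false, Bool.false_eq_true]
      have tail := ih (if (f a).isSome then f a else prev) (curr ++ [a]) pre
      have hl1 : pre ++ (curr ++ [a]) ++ l = pre ++ curr ++ a :: l := by simp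
      have hl2 : ((pre ++ (curr ++ [a])).length : Int) = ((pre ++ curr).length : Int) + 1 := by
        push_cast [List.length_append, List.length_singleton]
        ring
      rw [hl1, hl2] at tail
      exact tail

-- ===== VERDICT (by name: the statement is the Claim_ definition above) =====
theorem gap_split_py_spec : Claim_equal_gap_split_py := by
  intro annotations gap_threshold _
  unfold Spec_gap_split_py
  match annotations with
  | [] => rfl
  | a0 :: rest =>
    have hA := lemA gap_threshold rest [] [a0]
      (pageLabelToInt (pvGetD a0 "page_label" "")) (by simp) (by simp)
    simp only [List.nil_append] at hA
    have ha0 : (if (pageLabelToInt (pvGetD a0 "page_label" "")).isSome then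
        (pageLabelToInt (pvGetD a0 "page_label" "")) else none)
        = pageLabelToInt (pvGetD a0 "page_label" "") := by
      cases pageLabelToInt (pvGetD a0 "page_label" "") <;> rfl
    have hB1 := lemB1 gap_threshold (rest.map (fun a => pageLabelToInt (pvGetD a "page_label" "")))
      1 [] (pageLabelToInt (pvGetD a0 "page_label" "")) (by norm_num)
    simp only [List.nil_append] at hB1
    have hB2 := lemB2 gap_threshold (fun a => pageLabelToInt (pvGetD a "page_label" "")) rest
      (pageLabelToInt (pvGetD a0 "page_label" "")) [a0] []
    simp only [List.nil_append, List.singleton_append, List.length_nil, List.length_cons,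
      Nat.cast_zero] at hB2
    show _ = gap_split_py_alt (a0 :: rest) gap_threshold
    rw [gap_split_py, gap_split_py_alt]
    simp only [if_neg (List.cons_ne_nil a0 rest), List.map_cons]
    rw [PySem.List.enumerate_cons]
    simp only [List.foldl_cons, show (decide ((0:Int) > 0)) = false from by decide,
      Bool.false_and, Bool.false_eq_true, if_false]
    rw [ha0, show ((0:Int) + 1) = 1 from by norm_num, hB1, hA]
    have hn : (((a0 :: rest).length : Nat) : Int) = ((rest.length + 1 : Nat) : Int) := by
      norm_num
    show pvGo _ _ _ _ _ = pvSlices (a0 :: rest) 0 _ (((a0 :: rest).length : Nat) : Int)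
    rw [hn]
    norm_num at hB2
    norm_num
    exact hB2.symm
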